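-- pv_equiv track=rewrite | github.com/dmmiller597/CATHe2 | scripts/embed_prott5_stream.py | _iter_token_batches
-- ===== SOURCE A (Python) =====
-- from typing import Iterator, List, Tuple
--
-- def _iter_token_batches(
--     seqs: List[str],
--     idxs: List[int],
--     token_budget: int,
-- ) -> Iterator[Tuple[List[int], List[str]]]:
--     """Yield *(row_indices, sequences)* whose combined tokens ≤ *token_budget*.
--
--     Token count is approximated as len(seq) + 2 (special tokens).
--     """
--
--     buffer_ids: List[int] = []
--     buffer_seqs: List[str] = []
--     running = 0
--
--     for i, seq in zip(idxs, seqs):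
--         tokens = len(seq) + 2  # <s> and </s>
--         if buffer_seqs and running + tokens > token_budget:
--             yield buffer_ids, buffer_seqs
--             buffer_ids, buffer_seqs, running = [], [], 0
--         buffer_ids.append(i)
--         buffer_seqs.append(seq)
--         running += tokens
--
--     if buffer_seqs:
--         yield buffer_ids, buffer_seqs
-- ===== SOURCE B (Python) =====
-- def _iter_token_batches(seqs, idxs, token_budget):
--     """Two-pass rewrite: first record (start, end) batch boundaries over the
--     common prefix, then yield slices of idxs/seqs for each boundary pair."""
--     n = min(len(seqs), len(idxs))
--     lens = [len(s) + 2 for s in seqs[:n]]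
--     bounds = []
--     start = 0
--     running = 0
--     for pos, t in enumerate(lens):
--         if start < pos and running + t > token_budget:
--             bounds.append((start, pos))
--             start = pos
--             running = 0
--         running += t
--     if start < n:
--         bounds.append((start, n))
--     for s, e in bounds:
--         yield idxs[s:e], seqs[s:e]
-- ===== Notes on version B (the rewrite author's own statement) =====
-- stated objective: alternative
-- what changed: Replaced the single pass that grows per-batch id/sequence buffer lists with a two-pass decomposition: one pass over precomputed token lengths records integer (start, end) batch boundaries, and a second pass yields slices idxs[s:e], seqs[s:e].
import Mathlib
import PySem

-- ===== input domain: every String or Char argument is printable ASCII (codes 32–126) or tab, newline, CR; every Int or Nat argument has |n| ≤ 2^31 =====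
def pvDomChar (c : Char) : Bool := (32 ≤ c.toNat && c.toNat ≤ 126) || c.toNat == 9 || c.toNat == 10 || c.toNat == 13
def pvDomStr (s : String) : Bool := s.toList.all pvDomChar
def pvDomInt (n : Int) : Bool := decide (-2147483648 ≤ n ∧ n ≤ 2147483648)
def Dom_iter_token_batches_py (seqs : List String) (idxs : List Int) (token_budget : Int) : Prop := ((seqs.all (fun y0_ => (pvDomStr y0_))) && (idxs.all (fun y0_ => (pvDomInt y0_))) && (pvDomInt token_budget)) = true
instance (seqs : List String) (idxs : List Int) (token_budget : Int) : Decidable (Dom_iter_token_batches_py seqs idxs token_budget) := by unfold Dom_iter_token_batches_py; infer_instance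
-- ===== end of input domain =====

-- B replaces A's growing buffer lists with a boundary-index pass plus a slicing pass (objective: alternative decomposition, same cost).
-- The generator's yields are collected into the returned list, in order.

-- ===== PORT A =====
-- the `for i, seq in zip(idxs, seqs)` loop: state = (buffer_ids, buffer_seqs, running), acc = batches yielded so far
def pvALoop (token_budget : Int) : List (Int × String) → List Int → List String → Int → List (List Int × List String) → List (List Int × List String)
  | [], buffer_ids, buffer_seqs, _, acc =>
    -- trailing `if buffer_seqs: yield buffer_ids, buffer_seqs`
    if buffer_seqs ≠ [] then acc ++ [(buffer_ids, buffer_seqs)] else acc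
  | (i, seq) :: rest, buffer_ids, buffer_seqs, running, acc =>
    let tokens : Int := (seq.length : Int) + 2
    if buffer_seqs ≠ [] ∧ running + tokens > token_budget then
      pvALoop token_budget rest [i] [seq] tokens (acc ++ [(buffer_ids, buffer_seqs)])
    else
      pvALoop token_budget rest (buffer_ids ++ [i]) (buffer_seqs ++ [seq]) (running + tokens) acc

def iter_token_batches_py (seqs : List String) (idxs : List Int) (token_budget : Int) : List (List Int × List String) :=
  pvALoop token_budget (idxs.zip seqs) [] [] 0 []

-- ===== PORT B =====
-- the `for pos, t in enumerate(lens)` loop recording (start, pos) boundaries; the base case is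
-- the trailing `if start < n: bounds.append((start, n))` (pos = n when the loop ends)
def pvBLoop (token_budget : Int) : List Int → Nat → Nat → Int → List (Nat × Nat) → List (Nat × Nat)
  | [], pos, start, _, bounds => if start < pos then bounds ++ [(start, pos)] else bounds
  | t :: ts, pos, start, running, bounds =>
    if start < pos ∧ running + t > token_budget then
      pvBLoop token_budget ts (pos + 1) pos t (bounds ++ [(start, pos)])
    else
      pvBLoop token_budget ts (pos + 1) start (running + t) bounds

def iter_token_batches_py_alt (seqs : List String) (idxs : List Int) (token_budget : Int) : List (List Int × List String) :=
  let n := min seqs.length idxs.length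
  let lens := (seqs.take n).map (fun s => (s.length : Int) + 2)
  let bounds := pvBLoop token_budget lens 0 0 0 []
  -- xs[s:e] with 0 ≤ s ≤ e ≤ len xs is exactly (xs.take e).drop s
  bounds.map (fun p => ((idxs.take p.2).drop p.1, (seqs.take p.2).drop p.1))

-- ===== PRECONDITION & SPEC =====
def Spec_iter_token_batches_py (seqs : List String) (idxs : List Int) (token_budget : Int) (out : List (List Int × List String)) : Prop := out = iter_token_batches_py_alt seqs idxs token_budget
instance (seqs : List String) (idxs : List Int) (token_budget : Int) (out : List (List Int × List String)) : Decidable (Spec_iter_token_batches_py seqs idxs token_budget out) := by unfold Spec_iter_token_batches_py; infer_instance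

-- ===== CLAIM (what is proved, stated in full; the proofs are below) =====
def Claim_equal_iter_token_batches_py : Prop := ∀ (seqs : List String) (idxs : List Int) (token_budget : Int), Dom_iter_token_batches_py seqs idxs token_budget → Spec_iter_token_batches_py seqs idxs token_budget (iter_token_batches_py seqs idxs token_budget)

-- ===== LEMMAS AND PROOFS =====

-- turn a bounds list into batches by slicing the zipped list
def pvEmit (L : List (Int × String)) (bnds : List (Nat × Nat)) : List (List Int × List String) :=
  bnds.map (fun p => (((L.take p.2).drop p.1).map Prod.fst, ((L.take p.2).drop p.1).map Prod.snd))

theorem pvALoop_acc (token_budget : Int) : ∀ (rest : List (Int × String)) (bi : List Int) (bs : List String) (r : Int) (acc : List (List Int × List String)),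
    pvALoop token_budget rest bi bs r acc = acc ++ pvALoop token_budget rest bi bs r [] := by
  intro rest
  induction rest with
  | nil => intro bi bs r acc; simp [pvALoop]; split <;> simp
  | cons p rest ih =>
    intro bi bs r acc
    obtain ⟨i, s⟩ := p
    simp only [pvALoop]
    split
    · rw [ih _ _ _ (acc ++ [(bi, bs)]), ih _ _ _ ([] ++ [(bi, bs)])]; simp
    · rw [ih]

theorem pvBLoop_acc (token_budget : Int) : ∀ (ts : List Int) (pos start : Nat) (r : Int) (acc : List (Nat × Nat)),
    pvBLoop token_budget ts pos start r acc = acc ++ pvBLoop token_budget ts pos start r [] := by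
  intro ts
  induction ts with
  | nil => intro pos start r acc; simp [pvBLoop]; split <;> simp
  | cons t ts ih =>
    intro pos start r acc
    simp only [pvBLoop]
    split
    · rw [ih _ _ _ (acc ++ [(start, pos)]), ih _ _ _ ([] ++ [(start, pos)])]; simp
    · rw [ih]

theorem pvZip_take (α β : Type) : ∀ (a : List α) (b : List β) (e : Nat),
    (a.zip b).take e = (a.take e).zip (b.take e) := by
  intro a
  induction a with
  | nil => intro b e; simp
  | cons x a ih =>
    intro b e
    cases b with
    | nil => simp
    | cons y b =>
      cases e with
      | zero => simp
      | succ e => simp [List.zip_cons_cons, ih]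

-- the zipped list, truncated at e ≤ min of the lengths, projects to the takes of the two lists
theorem pvSlice_fst (a : List Int) (b : List String) (s e : Nat) (he : e ≤ min a.length b.length) :
    (((a.zip b).take e).drop s).map Prod.fst = (a.take e).drop s := by
  rw [pvZip_take, List.map_drop, List.map_fst_zip (by simp; omega)]

theorem pvSlice_snd (a : List Int) (b : List String) (s e : Nat) (he : e ≤ min a.length b.length) :
    (((a.zip b).take e).drop s).map Prod.snd = (b.take e).drop s := by
  rw [pvZip_take, List.map_drop, List.map_snd_zip (by simp; omega)]

-- every boundary pair produced by pvBLoop (from an empty accumulator, start ≤ pos) is well-formed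
theorem pvBLoop_bounds (token_budget : Int) : ∀ (ts : List Int) (pos start : Nat) (r : Int),
    start ≤ pos → ∀ p ∈ pvBLoop token_budget ts pos start r [], p.1 ≤ p.2 ∧ p.2 ≤ pos + ts.length := by
  intro ts
  induction ts with
  | nil =>
    intro pos start r hsp p hp
    simp only [pvBLoop] at hp
    split at hp <;> simp at hp
    · subst hp; simp; omega
  | cons t ts ih =>
    intro pos start r hsp p hp
    simp only [pvBLoop] at hp
    split at hp
    · rw [pvBLoop_acc] at hp
      simp at hp
      rcases hp with hp | hp
      · subst hp; simp; omega
      · have := ih (pos + 1) pos t (by omega) p hp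
        simp at this ⊢; omega
    · have := ih (pos + 1) start (r + t) (by omega) p hp
      simp at this ⊢; omega

-- the core bridge: A's buffer loop equals B's boundary loop, emitted as slices of the full pair list.
-- `before` is the already-emitted prefix, `buf` the current buffer (so pos = |before| + |buf|, start = |before|).
theorem pvBridge (token_budget : Int) : ∀ (rest buf before : List (Int × String)) (running : Int),
    pvALoop token_budget rest (buf.map Prod.fst) (buf.map Prod.snd) running []
      = pvEmit (before ++ buf ++ rest)
          (pvBLoop token_budget (rest.map (fun p => (p.2.length : Int) + 2))
            (before.length + buf.length) before.length running []) := by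
  intro rest
  induction rest with
  | nil =>
    intro buf before running
    simp only [pvALoop, pvBLoop, List.map_nil, List.append_nil]
    by_cases hb : buf = []
    · subst hb; simp [pvEmit]
    · have hlen : 0 < buf.length := List.length_pos_iff.mpr hb
      rw [if_pos (by simpa using hb), if_pos (by omega)]
      simp only [pvEmit, List.map_cons, List.map_nil, List.nil_append]
      have h1 : (before ++ buf).take (before.length + buf.length) = before ++ buf := by
        apply List.take_of_length_le; simp
      rw [h1, List.drop_left]
  | cons p rest ih =>
    intro buf before running
    obtain ⟨i, s⟩ := p
    simp only [pvALoop, List.map_cons, pvBLoop]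
    by_cases hb : buf = []
    · -- buffer empty: condition false on both sides
      subst hb
      rw [if_neg (by simp), if_neg (by simp)]
      have := ih [(i, s)] before (running + ((s.length : Int) + 2))
      simpa using this
    · have hlen : 0 < buf.length := List.length_pos_iff.mpr hb
      by_cases hc : running + ((s.length : Int) + 2) > token_budget
      · -- batch closes here
        rw [if_pos ⟨by simpa using hb, hc⟩, if_pos ⟨by omega, hc⟩]
        rw [pvALoop_acc, pvBLoop_acc]
        have := ih [(i, s)] (before ++ buf) ((s.length : Int) + 2)
        simp only [List.map_cons, List.map_nil, List.length_append] at this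
        rw [List.nil_append, this]
        simp only [pvEmit, List.map_cons, List.nil_append,
          List.append_assoc, List.cons_append]
        congr 1
        have h1 : (before ++ (buf ++ (i, s) :: rest)).take (before.length + buf.length)
            = before ++ buf := by
          rw [show before ++ (buf ++ (i, s) :: rest) = (before ++ buf) ++ ((i, s) :: rest) by simp,
            List.take_append_of_le_length (by simp), List.take_of_length_le (by simp)]
        rw [h1, List.drop_left]
      · -- sequence joins the buffer
        rw [if_neg (by rintro ⟨_, h⟩; exact hc h), if_neg (by rintro ⟨_, h⟩; exact hc h)]
        have := ih (buf ++ [(i, s)]) before (running + ((s.length : Int) + 2))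
        simp only [List.map_append, List.map_cons, List.map_nil, List.length_append,
          List.length_cons, List.length_nil] at this
        rw [this]
        simp [List.append_assoc]
        ring_nf

-- characterisation of A in terms of B's bounds over the zipped list
theorem pvA_eq_emit (seqs : List String) (idxs : List Int) (token_budget : Int) :
    iter_token_batches_py seqs idxs token_budget
      = pvEmit (idxs.zip seqs)
          (pvBLoop token_budget ((idxs.zip seqs).map (fun p => (p.2.length : Int) + 2)) 0 0 0 []) := by
  have := pvBridge token_budget (idxs.zip seqs) [] [] 0
  simpa [iter_token_batches_py] using this

-- the token list B builds equals the one over the zipped list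
theorem pvLens_eq (seqs : List String) (idxs : List Int) :
    (idxs.zip seqs).map (fun p => ((p.2.length : Int) + 2))
      = (seqs.take (min seqs.length idxs.length)).map (fun s => (s.length : Int) + 2) := by
  have h : (idxs.zip seqs).map (fun p => ((p.2.length : Int) + 2))
      = ((idxs.zip seqs).map Prod.snd).map (fun s => (s.length : Int) + 2) := by
    simp [List.map_map, Function.comp]
  rw [h]
  congr 1
  have hz : idxs.zip seqs = (idxs.zip seqs).take (min idxs.length seqs.length) := by
    rw [List.take_of_length_le (by simp)]
  rw [hz, pvZip_take, List.map_snd_zip (by simp)]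
  congr 1; omega

-- ===== VERDICT (by name: the statement is the Claim_ definition above) =====
theorem iter_token_batches_py_spec : Claim_equal_iter_token_batches_py := by
  intro seqs idxs token_budget _
  show iter_token_batches_py seqs idxs token_budget = iter_token_batches_py_alt seqs idxs token_budget
  rw [pvA_eq_emit, pvLens_eq]
  simp only [iter_token_batches_py_alt, pvEmit]
  apply List.map_congr_left
  intro p hp
  have hbound := pvBLoop_bounds token_budget
    ((seqs.take (min seqs.length idxs.length)).map (fun s => (s.length : Int) + 2)) 0 0 0
    (by omega) p hp
  simp only [List.length_map, List.length_take, Nat.zero_add] at hbound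
  have he : p.2 ≤ min idxs.length seqs.length := by omega
  rw [pvSlice_fst _ _ _ _ he, pvSlice_snd _ _ _ _ he]
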